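-- pv_equiv track=rewrite | github.com/segerpeter07/ToolBox-Geocoding | Geolocator.py | url_maker
-- ===== SOURCE A (Python) =====
-- def url_maker(location):
--     """
--     Given a string query, converts to URL that can be used to find location
--     """
--     query = location
--     words = []
--     base = 'https://maps.googleapis.com/maps/api/geocode/json?address='
--     words = query.split(' ')
--     res = base
--     i = 0
--     while i < len(words):
--         if i == 0:
--             res = res + words[i]
--         else:
--             res = res + '%' + words[i]
--         i += 1
--     return res
-- ===== SOURCE B (Python) =====
-- def url_maker(location):
--     """
--     Given a string query, converts to URL that can be used to find location
--     """
--     base = 'https://maps.googleapis.com/maps/api/geocode/json?address='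
--     return base + location.replace(' ', '%')
-- ===== Notes on version B (the rewrite author's own statement) =====
-- stated objective: simpler
-- what changed: Replaces the split-into-words list plus indexed while-loop concatenation (with a special case at index 0) by a single str.replace call that substitutes a percent sign for each space, which is extensionally equal to splitting on single spaces and joining on percent signs.
import Mathlib
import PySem

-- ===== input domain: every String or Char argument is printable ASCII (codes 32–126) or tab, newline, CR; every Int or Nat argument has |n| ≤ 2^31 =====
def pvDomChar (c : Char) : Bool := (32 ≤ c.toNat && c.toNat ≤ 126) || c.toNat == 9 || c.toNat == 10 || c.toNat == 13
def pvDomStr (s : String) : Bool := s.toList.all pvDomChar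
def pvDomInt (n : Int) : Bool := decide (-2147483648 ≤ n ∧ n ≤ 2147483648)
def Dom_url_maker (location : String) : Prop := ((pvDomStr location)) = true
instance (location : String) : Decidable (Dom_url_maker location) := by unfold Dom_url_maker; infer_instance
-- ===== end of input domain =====

-- B replaces A's split-on-space / indexed while-loop rejoin with a single str.replace(' ', '%'); same result, simpler.


-- ===== PORT A =====
-- the while loop: res accumulates words, '%' before every word except index 0
def urlLoopA (words : List (List Char)) (i : Nat) (res : List Char) : List Char :=
  if h : i < words.length then
    urlLoopA words (i + 1) (if i = 0 then res ++ words[i] else res ++ '%' :: words[i])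
  else res
termination_by words.length - i

def url_maker (location : String) : String :=
  let query := location
  let base := "https://maps.googleapis.com/maps/api/geocode/json?address="
  let words := PySem.Chars.splitOn query.toList [' ']
  String.ofList (urlLoopA words 0 base.toList)

-- ===== PORT B =====
def url_maker_alt (location : String) : String :=
  let base := "https://maps.googleapis.com/maps/api/geocode/json?address="
  String.ofList (base.toList ++ PySem.Chars.replace location.toList [' '] ['%'])

-- ===== PRECONDITION & SPEC =====
def Spec_url_maker (location : String) (out : String) : Prop := out = url_maker_alt location
instance (location : String) (out : String) : Decidable (Spec_url_maker location out) := by unfold Spec_url_maker; infer_instance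

-- ===== CLAIM (what is proved, stated in full; the proofs are below) =====
def Claim_equal_url_maker : Prop := ∀ (location : String), Dom_url_maker location → Spec_url_maker location (url_maker location)

-- ===== LEMMAS AND PROOFS =====

-- proof-only helpers
def pvSub (c : Char) : Char := if c = ' ' then '%' else c

def pvSplitSp : List Char → List (List Char)
  | [] => [[]]
  | c :: t =>
    if c = ' ' then [] :: pvSplitSp t
    else match pvSplitSp t with
      | [] => [[c]]
      | w :: ws => (c :: w) :: ws

lemma pvSplitSp_ne_nil (l : List Char) : pvSplitSp l ≠ [] := by
  cases l with
  | nil => simp [pvSplitSp]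
  | cons c t =>
    simp only [pvSplitSp]
    split_ifs
    · simp
    · cases h : pvSplitSp t <;> simp

def pvHcons (p : List Char) : List (List Char) → List (List Char)
  | [] => [p]
  | w :: ws => (p ++ w) :: ws

lemma pv_replace_go (l : List Char) : ∀ (fuel : Nat) (acc : List Char), l.length ≤ fuel →
    PySem.Chars.replace.go [' '] ['%'] fuel l acc = acc.reverse ++ l.map pvSub := by
  induction l with
  | nil =>
    intro fuel acc _
    cases fuel <;> simp [PySem.Chars.replace.go]
  | cons c t ih =>
    intro fuel acc hf
    cases fuel with
    | zero => simp at hf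
    | succ f =>
      simp only [PySem.Chars.replace.go]
      by_cases hc : c = ' '
      · have : [' '].isPrefixOf (c :: t) = true := by simp [List.isPrefixOf, hc]
        rw [if_pos this]
        simp only [List.length_cons] at hf
        rw [show List.drop [' '].length (c :: t) = t by simp]
        rw [ih f _ (by omega)]
        simp [pvSub, hc]
      · have hp : [' '].isPrefixOf (c :: t) = false := by
          simp only [List.isPrefixOf]; simp; exact Ne.symm hc
        rw [if_neg (by simp [hp])]
        simp only [List.length_cons] at hf
        rw [ih f _ (by omega)]
        simp [pvSub, hc]

lemma pv_replace_eq_map (l : List Char) :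
    PySem.Chars.replace l [' '] ['%'] = l.map pvSub := by
  simp only [PySem.Chars.replace, List.isEmpty]
  rw [if_neg (by simp)]
  simpa using pv_replace_go l l.length [] le_rfl

lemma pv_splitOn_go (l : List Char) : ∀ (fuel : Nat) (cur : List Char) (acc : List (List Char)),
    l.length < fuel →
    PySem.Chars.splitOn.go [' '] fuel l cur acc = acc.reverse ++ pvHcons cur.reverse (pvSplitSp l) := by
  induction l with
  | nil =>
    intro fuel cur acc hf
    cases fuel with
    | zero => omega
    | succ f => simp [PySem.Chars.splitOn.go, pvSplitSp, pvHcons]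
  | cons c t ih =>
    intro fuel cur acc hf
    cases fuel with
    | zero => omega
    | succ f =>
      simp only [PySem.Chars.splitOn.go]
      by_cases hc : c = ' '
      · have hp : [' '].isPrefixOf (c :: t) = true := by simp [List.isPrefixOf, hc]
        rw [if_pos hp]
        simp only [List.length_cons] at hf
        rw [show List.drop [' '].length (c :: t) = t by simp]
        rw [ih f _ _ (by omega)]
        simp only [pvSplitSp, if_pos hc, List.reverse_cons, List.reverse_nil,
          List.append_assoc, List.singleton_append]
        cases hks : pvSplitSp t with
        | nil => exact absurd hks (pvSplitSp_ne_nil t)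
        | cons w ws => simp [pvHcons]
      · have hp : [' '].isPrefixOf (c :: t) = false := by
          simp only [List.isPrefixOf]; simp; exact Ne.symm hc
        rw [if_neg (by simp [hp])]
        simp only [List.length_cons] at hf
        rw [ih f _ _ (by omega)]
        simp only [pvSplitSp, if_neg hc]
        cases h : pvSplitSp t with
        | nil => exact absurd h (pvSplitSp_ne_nil t)
        | cons w ws => simp [pvHcons]

lemma pv_splitOn_eq (l : List Char) :
    PySem.Chars.splitOn l [' '] = pvSplitSp l := by
  rw [PySem.Chars.splitOn, pv_splitOn_go l (l.length + 1) [] [] (by omega)]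
  cases h : pvSplitSp l with
  | nil => exact absurd h (pvSplitSp_ne_nil l)
  | cons w ws => simp [pvHcons]

lemma pv_loopA_tail (words : List (List Char)) : ∀ (i : Nat) (res : List Char),
    urlLoopA words (i + 1) res = res ++ (words.drop (i + 1)).flatMap (fun w => '%' :: w) := by
  have key : ∀ (k : Nat) (i : Nat) (res : List Char), words.length - (i + 1) = k →
      urlLoopA words (i + 1) res = res ++ (words.drop (i + 1)).flatMap (fun w => '%' :: w) := by
    intro k
    induction k with
    | zero =>
      intro i res hk
      rw [urlLoopA, dif_neg (by omega)]
      rw [List.drop_eq_nil_of_le (by omega)]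
      simp
    | succ n ih =>
      intro i res hk
      have hi : i + 1 < words.length := by omega
      rw [urlLoopA, dif_pos hi, if_neg (by omega)]
      rw [ih (i + 1) _ (by omega), List.drop_eq_getElem_cons hi, List.flatMap_cons]
      simp
  intro i res
  exact key (words.length - (i + 1)) i res rfl

lemma pv_intercalate_cons_head (c : Char) (w : List Char) (ws : List (List Char)) :
    ['%'].intercalate ((c :: w) :: ws) = c :: ['%'].intercalate (w :: ws) := by
  cases ws with
  | nil => simp [List.intercalate]
  | cons v vs => simp [List.intercalate, List.intersperse_cons₂]

lemma pv_intercalate_nil_head (w : List Char) (ws : List (List Char)) :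
    ['%'].intercalate ([] :: w :: ws) = '%' :: ['%'].intercalate (w :: ws) := by
  simp [List.intercalate, List.intersperse_cons₂]

lemma pv_flatMap_percent (w : List Char) (ws : List (List Char)) :
    w ++ ws.flatMap (fun w => '%' :: w) = PySem.Chars.join ['%'] (w :: ws) := by
  induction ws generalizing w with
  | nil => simp [PySem.Chars.join, List.intercalate]
  | cons v vs ih =>
    simp only [PySem.Chars.join, List.intercalate, List.intersperse_cons₂,
      List.flatten_cons, List.flatMap_cons] at ih ⊢
    rw [← ih v]
    simp

lemma pv_join_splitSp (l : List Char) :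
    PySem.Chars.join ['%'] (pvSplitSp l) = l.map pvSub := by
  induction l with
  | nil => simp [pvSplitSp, PySem.Chars.join, List.intercalate]
  | cons c t ih =>
    by_cases hc : c = ' '
    · simp only [pvSplitSp, if_pos hc]
      cases h : pvSplitSp t with
      | nil => exact absurd h (pvSplitSp_ne_nil t)
      | cons w ws =>
        rw [h] at ih
        simp only [PySem.Chars.join] at ih ⊢
        rw [pv_intercalate_nil_head, ih]
        simp [pvSub, hc]
    · simp only [pvSplitSp, if_neg hc]
      cases h : pvSplitSp t with
      | nil => exact absurd h (pvSplitSp_ne_nil t)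
      | cons w ws =>
        rw [h] at ih
        simp only [PySem.Chars.join] at ih ⊢
        rw [pv_intercalate_cons_head, ih]
        simp [pvSub, hc]

lemma pv_loopA_eq (ws : List (List Char)) (hws : ws ≠ []) (res : List Char) :
    urlLoopA ws 0 res = res ++ PySem.Chars.join ['%'] ws := by
  cases ws with
  | nil => exact absurd rfl hws
  | cons w rest =>
    rw [urlLoopA, dif_pos (by simp), if_pos rfl]
    rw [show (0 : Nat) + 1 = 0 + 1 from rfl, pv_loopA_tail]
    simp only [List.getElem_cons_zero, List.drop_succ_cons, List.drop_zero]
    rw [List.append_assoc, pv_flatMap_percent]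

-- ===== VERDICT (by name: the statement is the Claim_ definition above) =====
theorem url_maker_spec : Claim_equal_url_maker := by
  intro location _
  unfold Spec_url_maker url_maker url_maker_alt
  simp only
  rw [pv_splitOn_eq, pv_loopA_eq _ (pvSplitSp_ne_nil _), pv_join_splitSp,
    pv_replace_eq_map]
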